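-- pv_equiv track=rewrite | github.com/rafathebuilder-ZK/protocols-AI-capability-maturity-model | _Deploy-Archive/2026-04-24-pre-migration/litepaper-ai-protocols/design-tests-v2.py | has_direct_ol_child
-- ===== SOURCE A (Python) =====
-- def has_direct_ol_child(block):
--     depth = 0
--     i = 0
--     while i < len(block):
--         if block[i:i+4] == '<div':
--             depth += 1
--         elif block[i:i+6] == '</div>':
--             depth -= 1
--         elif depth == 0 and block[i:i+3] == '<ol':
--             return True
--         i += 1
--     return False
-- ===== SOURCE B (Python) =====
-- import re
--
-- _TAG = re.compile(r'<div|</div>|<ol')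
--
-- def has_direct_ol_child(block):
--     depth = 0
--     for m in _TAG.finditer(block):
--         tok = m.group()
--         if tok == '<div':
--             depth += 1
--         elif tok == '</div>':
--             depth -= 1
--         elif depth == 0:
--             return True
--     return False
-- ===== Notes on version B (the rewrite author's own statement) =====
-- stated objective: idiomatic
-- what changed: Replaced the per-character while loop with three slice comparisons at every index by a regex tokenizer (re.finditer over '<div|</div>|<ol') that visits only the tag occurrences left to right and keeps the depth counter; the scan runs in C instead of per-character Python slicing.
import Mathlib
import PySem

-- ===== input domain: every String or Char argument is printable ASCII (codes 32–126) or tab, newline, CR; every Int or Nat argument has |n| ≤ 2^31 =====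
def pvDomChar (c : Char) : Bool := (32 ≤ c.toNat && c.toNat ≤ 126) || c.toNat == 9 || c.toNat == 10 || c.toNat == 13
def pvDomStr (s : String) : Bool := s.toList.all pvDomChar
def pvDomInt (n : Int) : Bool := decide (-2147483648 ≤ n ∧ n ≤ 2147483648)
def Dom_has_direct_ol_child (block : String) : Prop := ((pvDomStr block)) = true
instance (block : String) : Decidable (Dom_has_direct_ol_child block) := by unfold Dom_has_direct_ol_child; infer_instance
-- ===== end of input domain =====

-- B replaces A's per-character slice comparisons by a regex tokenizer (re.finditer over
-- '<div|</div>|<ol') that visits only tag occurrences; equivalence of the two scans is proved.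

-- ===== PORT A =====
-- A scans every index i, comparing the slices block[i:i+4], block[i:i+6], block[i:i+3];
-- the suffix at i is the list, the slice is `take` of it, and i += 1 drops one character.
def hasRecA : List Char → Int → Bool
  | [], _ => false
  | c :: rest, depth =>
    if (c :: rest).take 4 = ['<', 'd', 'i', 'v'] then hasRecA rest (depth + 1)
    else if (c :: rest).take 6 = ['<', '/', 'd', 'i', 'v', '>'] then hasRecA rest (depth - 1)
    else if depth = 0 ∧ (c :: rest).take 3 = ['<', 'o', 'l'] then true
    else hasRecA rest depth

def has_direct_ol_child (block : String) : Bool := hasRecA block.toList 0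

-- ===== PORT B =====
-- Source B iterates over re.finditer(r'<div|</div>|<ol', block): matches are found left to
-- right and each match is consumed (the scan resumes after it); the three alternatives are
-- mutually exclusive at any position.  Ported step for step: advance one character until a
-- token starts, then consume the whole token and update/test depth as Source B's loop body does.
def hasRecB : List Char → Int → Bool
  | [], _ => false
  | c :: rest, depth =>
    if c = '<' ∧ rest.take 3 = ['d', 'i', 'v'] then hasRecB (rest.drop 3) (depth + 1)
    else if c = '<' ∧ rest.take 5 = ['/', 'd', 'i', 'v', '>'] then hasRecB (rest.drop 5) (depth - 1)
    else if c = '<' ∧ rest.take 2 = ['o', 'l'] then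
      (if depth = 0 then true else hasRecB (rest.drop 2) depth)
    else hasRecB rest depth
  termination_by l _ => l.length
  decreasing_by all_goals simp [List.length_drop]

def has_direct_ol_child_alt (block : String) : Bool := hasRecB block.toList 0

-- ===== PRECONDITION & SPEC =====
def Spec_has_direct_ol_child (block : String) (out : Bool) : Prop := out = has_direct_ol_child_alt block
instance (block : String) (out : Bool) : Decidable (Spec_has_direct_ol_child block out) := by unfold Spec_has_direct_ol_child; infer_instance

-- ===== CLAIM (what is proved, stated in full; the proofs are below) =====
def Claim_equal_has_direct_ol_child : Prop := ∀ (block : String), Dom_has_direct_ol_child block → Spec_has_direct_ol_child block (has_direct_ol_child block)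

-- ===== LEMMAS AND PROOFS =====

-- A character that is not '<' starts no token: A's scan just moves on.
theorem hasRecA_ne (c : Char) (rest : List Char) (d : Int) (h : c ≠ '<') :
    hasRecA (c :: rest) d = hasRecA rest d := by
  simp [hasRecA, List.take, h]

theorem hasRecA_eq_hasRecB : ∀ (n : ℕ) (l : List Char) (d : Int),
    l.length ≤ n → hasRecA l d = hasRecB l d := by
  intro n
  induction n with
  | zero =>
    intro l d h
    have : l = [] := List.eq_nil_of_length_eq_zero (Nat.le_zero.mp h)
    subst this; simp [hasRecA, hasRecB]
  | succ n ih =>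
    intro l d h
    match l with
    | [] => simp [hasRecA, hasRecB]
    | c :: rest =>
      simp only [List.length_cons, Nat.succ_le_succ_iff] at h
      by_cases hc : c = '<'
      · subst hc
        by_cases h1 : rest.take 3 = ['d', 'i', 'v']
        · -- '<div'
          obtain ⟨t, ht⟩ : ∃ t, rest = 'd' :: 'i' :: 'v' :: t := by
            match rest, h1 with
            | _ :: _ :: _ :: t, h1 =>
              simp only [List.take, List.cons.injEq] at h1
              exact ⟨t, by simp [h1.1, h1.2.1, h1.2.2.1]⟩
          subst ht
          rw [show hasRecA ('<' :: 'd' :: 'i' :: 'v' :: t) d = hasRecA t (d + 1) by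
                simp [hasRecA]]
          rw [show hasRecB ('<' :: 'd' :: 'i' :: 'v' :: t) d = hasRecB t (d + 1) by
                simp [hasRecB]]
          rw [ih t (d + 1) (by simp at h; omega)]
        · by_cases h2 : rest.take 5 = ['/', 'd', 'i', 'v', '>']
          · -- '</div>'
            obtain ⟨t, ht⟩ : ∃ t, rest = '/' :: 'd' :: 'i' :: 'v' :: '>' :: t := by
              match rest, h2 with
              | _ :: _ :: _ :: _ :: _ :: t, h2 =>
                simp only [List.take, List.cons.injEq] at h2
                exact ⟨t, by simp [h2.1, h2.2.1, h2.2.2.1, h2.2.2.2.1, h2.2.2.2.2.1]⟩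
            subst ht
            rw [show hasRecA ('<' :: '/' :: 'd' :: 'i' :: 'v' :: '>' :: t) d
                  = hasRecA t (d - 1) by simp [hasRecA]]
            rw [show hasRecB ('<' :: '/' :: 'd' :: 'i' :: 'v' :: '>' :: t) d
                  = hasRecB t (d - 1) by simp [hasRecB]]
            rw [ih t (d - 1) (by simp at h; omega)]
          · by_cases h3 : rest.take 2 = ['o', 'l']
            · -- '<ol'
              obtain ⟨t, ht⟩ : ∃ t, rest = 'o' :: 'l' :: t := by
                match rest, h3 with
                | _ :: _ :: t, h3 =>
                  simp only [List.take, List.cons.injEq] at h3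
                  exact ⟨t, by simp [h3.1, h3.2.1]⟩
              subst ht
              by_cases hd : d = 0
              · subst hd
                rw [show hasRecA ('<' :: 'o' :: 'l' :: t) 0 = true by simp [hasRecA]]
                rw [show hasRecB ('<' :: 'o' :: 'l' :: t) 0 = true by simp [hasRecB]]
              · rw [show hasRecA ('<' :: 'o' :: 'l' :: t) d
                      = hasRecA ('o' :: 'l' :: t) d by simp [hasRecA, hd]]
                rw [show hasRecB ('<' :: 'o' :: 'l' :: t) d = hasRecB t d by
                      simp [hasRecB, hd]]
                rw [hasRecA_ne 'o' _ d (by decide), hasRecA_ne 'l' _ d (by decide)]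
                exact ih t d (by simp at h; omega)
            · -- '<' starting no token
              rw [show hasRecA ('<' :: rest) d = hasRecA rest d by
                    simp [hasRecA, h1, h2, h3]]
              rw [show hasRecB ('<' :: rest) d = hasRecB rest d by
                    simp [hasRecB, h1, h2, h3]]
              exact ih rest d h
      · rw [hasRecA_ne c rest d hc]
        rw [show hasRecB (c :: rest) d = hasRecB rest d by simp [hasRecB, hc]]
        exact ih rest d h

-- ===== VERDICT (by name: the statement is the Claim_ definition above) =====
theorem has_direct_ol_child_spec : Claim_equal_has_direct_ol_child := by
  intro block _
  unfold Spec_has_direct_ol_child has_direct_ol_child has_direct_ol_child_alt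
  exact hasRecA_eq_hasRecB block.toList.length block.toList 0 le_rfl
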